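-- pv_equiv track=rewrite | github.com/Alexandre-CES/desenvolve-python-intermediario | modulo1/rich/personalizador/layout.py | dividir_texto_em_partes
-- ===== SOURCE A (Python) =====
-- def dividir_texto_em_partes(texto, num_partes):
--     """Divide o texto em um número especificado de partes."""
--     tamanho = len(texto)
--     parte_tamanho = tamanho // num_partes
--
--     partes = []
--     for i in range(num_partes):
--         inicio = i * parte_tamanho
--         if i == num_partes - 1:
--             partes.append(texto[inicio:])
--         else:
--             partes.append(texto[inicio:inicio + parte_tamanho])
--
--     return partes
-- ===== SOURCE B (Python) =====
-- def dividir_texto_em_partes(texto, num_partes):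
--     """Divide o texto em um número especificado de partes."""
--     parte_tamanho = len(texto) // num_partes
--     partes = []
--     resto = texto
--     k = num_partes
--     while k > 1:
--         partes.append(resto[:parte_tamanho])
--         resto = resto[parte_tamanho:]
--         k -= 1
--     if k == 1:
--         partes.append(resto)
--     return partes
-- ===== Notes on version B (the rewrite author's own statement) =====
-- stated objective: alternative
-- what changed: Replaces A's index-arithmetic loop over range(num_partes) by a peel loop that repeatedly cuts the next chunk off the front of the remaining string, so no start indices are ever computed; it trades speed for that (re-slicing the remainder copies it each step).
import Mathlib
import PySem

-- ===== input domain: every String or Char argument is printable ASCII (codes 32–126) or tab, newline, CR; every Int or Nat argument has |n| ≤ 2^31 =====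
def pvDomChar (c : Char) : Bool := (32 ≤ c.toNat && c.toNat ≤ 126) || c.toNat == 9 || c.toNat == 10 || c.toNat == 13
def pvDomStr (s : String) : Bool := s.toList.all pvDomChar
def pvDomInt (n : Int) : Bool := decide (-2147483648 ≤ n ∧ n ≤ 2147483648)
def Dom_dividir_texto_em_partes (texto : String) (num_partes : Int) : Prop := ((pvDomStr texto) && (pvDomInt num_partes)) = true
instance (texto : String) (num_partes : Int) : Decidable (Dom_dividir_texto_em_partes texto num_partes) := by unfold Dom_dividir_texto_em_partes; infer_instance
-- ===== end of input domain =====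

-- B replaces A's index-arithmetic loop by a peel loop that repeatedly cuts the next chunk off the front of the remaining string (alternative decomposition, same cost).

-- ===== PORT A =====
def dividir_texto_em_partes (texto : String) (num_partes : Int) : List String :=
  let tamanho : Int := PySem.Str.len texto
  let parte_tamanho : Int := PySem.Int.floordiv tamanho num_partes
  let partes : List String := (PySem.List.pyRange 0 num_partes 1).foldl (fun partes i =>
    let inicio := i * parte_tamanho
    if i = num_partes - 1 then
      partes ++ [PySem.Str.slice texto (some inicio) none]
    else
      partes ++ [PySem.Str.slice texto (some inicio) (some (inicio + parte_tamanho))]) []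
  partes

-- ===== PORT B =====
-- the while loop of Source B: state (resto, k, partes)
def pvPeel (parte_tamanho : Int) (resto : String) (k : Int) (partes : List String) : List String :=
  if 1 < k then
    pvPeel parte_tamanho (PySem.Str.slice resto (some parte_tamanho) none) (k - 1)
      (partes ++ [PySem.Str.slice resto none (some parte_tamanho)])
  else if k = 1 then partes ++ [resto]
  else partes
termination_by k.toNat
decreasing_by omega

def dividir_texto_em_partes_alt (texto : String) (num_partes : Int) : List String :=
  let parte_tamanho : Int := PySem.Int.floordiv (PySem.Str.len texto) num_partes
  pvPeel parte_tamanho texto num_partes []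

-- ===== PRECONDITION & SPEC =====
-- Pre_ excludes exactly num_partes = 0, where A raises ZeroDivisionError (B raises there too).
def Pre_dividir_texto_em_partes (texto : String) (num_partes : Int) : Prop := num_partes ≠ 0
instance (texto : String) (num_partes : Int) : Decidable (Pre_dividir_texto_em_partes texto num_partes) := by unfold Pre_dividir_texto_em_partes; infer_instance
def pvWitness_dividir_texto_em_partes : String × Int := ("abcdef", 3)

def Spec_dividir_texto_em_partes (texto : String) (num_partes : Int) (out : List String) : Prop := out = dividir_texto_em_partes_alt texto num_partes
instance (texto : String) (num_partes : Int) (out : List String) : Decidable (Spec_dividir_texto_em_partes texto num_partes out) := by unfold Spec_dividir_texto_em_partes; infer_instance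

-- ===== CLAIM (what is proved, stated in full; the proofs are below) =====
def Claim_equal_dividir_texto_em_partes : Prop := ∀ (texto : String) (num_partes : Int), Dom_dividir_texto_em_partes texto num_partes → Pre_dividir_texto_em_partes texto num_partes → Spec_dividir_texto_em_partes texto num_partes (dividir_texto_em_partes texto num_partes)

-- ===== LEMMAS AND PROOFS =====

-- the peel loop appends exactly the A-style slices of the current remainder string
lemma pvPeel_eq_map (pt : Int) (hpt : 0 ≤ pt) :
    ∀ (m : Nat) (n : Int), n.toNat = m → 1 ≤ n → ∀ (s : String) (acc : List String),
      pvPeel pt s n acc = acc ++ (PySem.List.pyRange 0 n 1).map (fun i =>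
        if i = n - 1 then PySem.Str.slice s (some (i * pt)) none
        else PySem.Str.slice s (some (i * pt)) (some (i * pt + pt))) := by
  intro m
  induction m with
  | zero => intro n hm hn; omega
  | succ m' ih =>
    intro n hm hn s acc
    by_cases h1 : n = 1
    · subst h1
      rw [pvPeel]
      simp [PySem.List.pyRange_one, PySem.Str.slice, PySem.Chars.slice,
        PySem.List.slice_zero_start, PySem.List.slice_none_none, List.range_succ]
    · have h2 : 2 ≤ n := by omega
      rw [pvPeel, if_pos (by omega : 1 < n),
          ih (n - 1) (by omega) (by omega) (PySem.Str.slice s (some pt) none) _,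
          PySem.List.pyRange_one_cons (show (0:Int) < n by omega), List.map_cons,
          List.append_assoc, List.singleton_append]
      refine congrArg (acc ++ ·) (List.cons_eq_cons.mpr ⟨?_, ?_⟩)
      · rw [if_neg (by omega), zero_mul, zero_add]
        simp [PySem.Str.slice, PySem.Chars.slice, PySem.List.slice_zero_start]
      · rw [PySem.List.pyRange_one 0 (n-1), PySem.List.pyRange_one (0+1) n,
            List.map_map, List.map_map]
        have hlen : (n - 1 - 0).toNat = (n - (0+1)).toNat := by omega
        rw [hlen]
        apply List.map_congr_left
        intro k hk
        simp only [List.mem_range] at hk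
        simp only [Function.comp_apply, zero_add]
        have hk0 : (0:Int) ≤ (k:Int) * pt := by positivity
        have hk1 : (0:Int) ≤ (1 + (k:Int)) * pt := by positivity
        have hr : (1 + (k:Int)) * pt = (k:Int) * pt + pt := by ring
        have e1 : PySem.Str.slice (PySem.Str.slice s (some pt) none) (some ((k:Int) * pt)) none
            = PySem.Str.slice s (some ((1 + (k:Int)) * pt)) none := by
          simp only [PySem.Str.slice, PySem.Chars.slice, String.toList_ofList]
          rw [PySem.List.slice_from _ hpt, PySem.List.slice_from _ hk0,
              PySem.List.slice_from _ hk1, List.drop_drop]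
          have hN : pt.toNat + ((k:Int) * pt).toNat = ((1 + (k:Int)) * pt).toNat := by omega
          rw [hN]
        have e2 : PySem.Str.slice (PySem.Str.slice s (some pt) none) (some ((k:Int) * pt)) (some ((k:Int) * pt + pt))
            = PySem.Str.slice s (some ((1 + (k:Int)) * pt)) (some ((1 + (k:Int)) * pt + pt)) := by
          simp only [PySem.Str.slice, PySem.Chars.slice, String.toList_ofList]
          rw [PySem.List.slice_from _ hpt,
              PySem.List.slice_toNat _ hk0 (by positivity),
              PySem.List.slice_toNat _ hk1 (by positivity),
              List.drop_drop]
          have hN : pt.toNat + ((k:Int) * pt).toNat = ((1 + (k:Int)) * pt).toNat := by omega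
          have hM : ((k:Int) * pt + pt).toNat - ((k:Int) * pt).toNat
              = ((1 + (k:Int)) * pt + pt).toNat - ((1 + (k:Int)) * pt).toNat := by omega
          rw [hN, hM]
        by_cases hl : 1 + (k:Int) = n - 1
        · rw [if_pos (by omega : (k:Int) = n - 1 - 1), if_pos hl, e1]
        · rw [if_neg (by omega : ¬ (k:Int) = n - 1 - 1), if_neg hl, e2]

-- ===== VERDICT (by name: the statement is the Claim_ definition above) =====
theorem dividir_texto_em_partes_spec : Claim_equal_dividir_texto_em_partes := by
  intro texto n _ hn
  unfold Spec_dividir_texto_em_partes dividir_texto_em_partes dividir_texto_em_partes_alt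
  dsimp only
  rcases lt_or_gt_of_ne hn with hneg | hpos
  · rw [PySem.List.pyRange_one_eq_nil (by omega), pvPeel, if_neg (by omega), if_neg (by omega)]
    simp
  · have hpt : 0 ≤ PySem.Int.floordiv (PySem.Str.len texto) n := by
      rw [PySem.Int.floordiv_eq_ediv_of_pos hpos]
      exact Int.ediv_nonneg (by simp [PySem.Str.len]) (le_of_lt hpos)
    rw [pvPeel_eq_map _ hpt n.toNat n rfl (by omega) texto []]
    rw [show (fun (partes : List String) (i : Int) =>
          if i = n - 1 then partes ++ [PySem.Str.slice texto (some (i * PySem.Int.floordiv (PySem.Str.len texto) n)) none]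
          else partes ++ [PySem.Str.slice texto (some (i * PySem.Int.floordiv (PySem.Str.len texto) n))
                 (some (i * PySem.Int.floordiv (PySem.Str.len texto) n + PySem.Int.floordiv (PySem.Str.len texto) n))])
        = (fun partes i => partes ++ [if i = n - 1
            then PySem.Str.slice texto (some (i * PySem.Int.floordiv (PySem.Str.len texto) n)) none
            else PySem.Str.slice texto (some (i * PySem.Int.floordiv (PySem.Str.len texto) n))
                 (some (i * PySem.Int.floordiv (PySem.Str.len texto) n + PySem.Int.floordiv (PySem.Str.len texto) n))])
      from by funext partes i; by_cases h : i = n - 1 <;> simp [h]]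
    rw [PySem.List.foldl_append_singleton_eq_map]
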